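-- pv_equiv track=rewrite | github.com/Ashprakash/CKLM | BERT/bert_sentence_model.py | get_segment_ids
-- ===== SOURCE A (Python) =====
-- def get_segment_ids(tokenized_text):
--     question_encountered = False
--     segmend_ids = []
--     for token in tokenized_text:
--         if token == '?':
--             question_encountered = True
--             segmend_ids.append(0)
--             continue
--
--         if question_encountered:
--             segmend_ids.append(1)
--         else:
--             segmend_ids.append(0)
--     return segmend_ids
-- ===== SOURCE B (Python) =====
-- def get_segment_ids(tokenized_text):
--     # Compute the split point once, then build the two blocks directly.
--     # Note: '?' tokens always get segment id 0, even after the first one.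
--     try:
--         idx = tokenized_text.index('?')
--     except ValueError:
--         return [0] * len(tokenized_text)
--     return [0] * (idx + 1) + [0 if t == '?' else 1 for t in tokenized_text[idx + 1:]]
-- ===== Notes on version B (the rewrite author's own statement) =====
-- stated objective: simpler
-- what changed: Replaces the per-token flag-carrying append loop by computing the first index of '?' once and concatenating a replicated zero block with a mapped tail.
import Mathlib
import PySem

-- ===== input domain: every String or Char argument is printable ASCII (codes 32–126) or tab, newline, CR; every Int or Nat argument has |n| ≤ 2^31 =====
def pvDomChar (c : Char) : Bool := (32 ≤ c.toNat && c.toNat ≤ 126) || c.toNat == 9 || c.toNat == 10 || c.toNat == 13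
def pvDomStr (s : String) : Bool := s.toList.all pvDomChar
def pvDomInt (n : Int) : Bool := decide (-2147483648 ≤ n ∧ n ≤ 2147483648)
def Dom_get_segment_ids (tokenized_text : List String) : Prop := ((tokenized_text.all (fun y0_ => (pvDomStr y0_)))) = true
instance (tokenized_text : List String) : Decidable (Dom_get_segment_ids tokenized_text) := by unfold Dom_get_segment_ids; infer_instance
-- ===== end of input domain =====

-- B replaces A's per-token flag loop by computing the first index of '?' once and
-- concatenating a replicated zero block with a mapped tail (objective: simpler).

-- ===== PORT A =====
-- the loop body: state = (question_encountered, segmend_ids)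
def segStep (st : Bool × List Int) (token : String) : Bool × List Int :=
  if token == "?" then (true, st.2 ++ [0])
  else if st.1 then (st.1, st.2 ++ [1]) else (st.1, st.2 ++ [0])

def get_segment_ids (tokenized_text : List String) : List Int :=
  (tokenized_text.foldl segStep (false, [])).2

-- ===== PORT B =====
def get_segment_ids_alt (tokenized_text : List String) : List Int :=
  match PySem.List.index? tokenized_text "?" with
  | none => List.replicate tokenized_text.length 0
  | some idx =>
      List.replicate (idx + 1) 0 ++
        (PySem.List.slice tokenized_text (some ((idx : Int) + 1)) none).map
          (fun t => if t == "?" then (0 : Int) else 1)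

-- ===== PRECONDITION & SPEC =====
def Spec_get_segment_ids (tokenized_text : List String) (out : List Int) : Prop := out = get_segment_ids_alt tokenized_text
instance (tokenized_text : List String) (out : List Int) : Decidable (Spec_get_segment_ids tokenized_text out) := by unfold Spec_get_segment_ids; infer_instance

-- ===== CLAIM (what is proved, stated in full; the proofs are below) =====
def Claim_equal_get_segment_ids : Prop := ∀ (tokenized_text : List String), Dom_get_segment_ids tokenized_text → Spec_get_segment_ids tokenized_text (get_segment_ids tokenized_text)

-- ===== LEMMAS AND PROOFS =====

theorem alt_nil : get_segment_ids_alt [] = [] := rfl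

theorem slice_from_succ {α : Type} (xs : List α) (i : Nat) :
    PySem.List.slice xs (some ((i : Int) + 1)) none = xs.drop (i + 1) := by
  rw [show ((i : Int) + 1) = ((i + 1 : Nat) : Int) by push_cast; ring,
      PySem.List.slice_from_natCast]

theorem alt_cons (t : String) (ts : List String) :
    get_segment_ids_alt (t :: ts) =
      if t == "?" then 0 :: ts.map (fun u => if u == "?" then (0 : Int) else 1)
      else 0 :: get_segment_ids_alt ts := by
  by_cases h : t = "?"
  · subst h
    unfold get_segment_ids_alt
    rw [PySem.List.index?_cons_self]
    simp [PySem.List.slice_from_one]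
  · unfold get_segment_ids_alt
    rw [PySem.List.index?_cons_of_ne ts h]
    cases hidx : PySem.List.index? ts "?" with
    | none => simp [h, List.replicate_succ]
    | some i =>
        simp [h, List.replicate_succ]
        rw [show ((i : Int) + 1 + 1) = (((i + 1 : Nat) : Int) + 1) by push_cast; ring,
            slice_from_succ, List.drop_succ_cons]
        simp [List.map_drop, slice_from_succ]

theorem foldl_true (ts : List String) (acc : List Int) :
    (ts.foldl segStep (true, acc)).2 =
      acc ++ ts.map (fun u => if u == "?" then (0 : Int) else 1) := by
  induction ts generalizing acc with
  | nil => simp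
  | cons t ts ih =>
      by_cases h : t = "?" <;> simp [segStep, h, ih]

theorem foldl_false (ts : List String) (acc : List Int) :
    (ts.foldl segStep (false, acc)).2 = acc ++ get_segment_ids_alt ts := by
  induction ts generalizing acc with
  | nil => simp [alt_nil]
  | cons t ts ih =>
      rw [alt_cons]
      by_cases h : t = "?"
      · simp [segStep, h, foldl_true]
      · simp [segStep, h, ih]

-- ===== VERDICT (by name: the statement is the Claim_ definition above) =====
theorem get_segment_ids_spec : Claim_equal_get_segment_ids := by
  intro ts _
  unfold Spec_get_segment_ids get_segment_ids
  simpa using foldl_false ts []
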